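-- pv_equiv track=rewrite | github.com/franciumgod/cpsHAR | standalone_feature_table_builder.py | _resolve_sampling_rule_for_state
-- ===== SOURCE A (Python) =====
-- from typing import Dict, Iterable, List, Optional, Sequence, Tuple
--
-- DEFAULT_SPECIAL_RULES = {
--     "Driving(curve)": {"window_points": 4000, "step_points": 800},
--     "Stationary processes": {"window_points": 4000, "step_points": 800},
--     "Turntable wrapping": {"window_points": 4000, "step_points": 800},
--     "Lifting(raising)": {"window_points": 2000, "step_points": 200},
--     "Lifting(lowering)": {"window_points": 2000, "step_points": 200},
-- }
--
-- SPECIAL_PRIORITY = [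
--     "Lifting(raising)",
--     "Lifting(lowering)",
--     "Driving(curve)",
--     "Stationary processes",
--     "Turntable wrapping",
--     "Driving(straight)",
-- ]
--
-- def _resolve_sampling_rule_for_state(
--     state_name: str,
--     default_window_points: int,
--     default_step_points: int,
--     special_mode: bool,
--     sampling_rules: Optional[Dict[str, Dict[str, int]]] = None,
-- ) -> Tuple[int, int]:
--     if not special_mode:
--         return int(default_window_points), int(default_step_points)
--
--     merged_rules = dict(DEFAULT_SPECIAL_RULES)
--     if sampling_rules:
--         merged_rules.update(sampling_rules)
--
--     active = set(state_name.split("+")) if state_name and state_name != "NONE" else set()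
--     for label_name in SPECIAL_PRIORITY:
--         if label_name in active and label_name in merged_rules:
--             rule = merged_rules[label_name]
--             return int(rule["window_points"]), int(rule["step_points"])
--
--     return int(default_window_points), int(default_step_points)
-- ===== SOURCE B (Python) =====
-- from typing import Dict, Optional, Tuple
--
-- DEFAULT_SPECIAL_RULES = {
--     "Driving(curve)": {"window_points": 4000, "step_points": 800},
--     "Stationary processes": {"window_points": 4000, "step_points": 800},
--     "Turntable wrapping": {"window_points": 4000, "step_points": 800},
--     "Lifting(raising)": {"window_points": 2000, "step_points": 200},
--     "Lifting(lowering)": {"window_points": 2000, "step_points": 200},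
-- }
--
-- SPECIAL_PRIORITY = [
--     "Lifting(raising)",
--     "Lifting(lowering)",
--     "Driving(curve)",
--     "Stationary processes",
--     "Turntable wrapping",
--     "Driving(straight)",
-- ]
--
--
-- def _resolve_sampling_rule_for_state(
--     state_name: str,
--     default_window_points: int,
--     default_step_points: int,
--     special_mode: bool,
--     sampling_rules: Optional[Dict[str, Dict[str, int]]] = None,
-- ) -> Tuple[int, int]:
--     if not special_mode:
--         return int(default_window_points), int(default_step_points)
--
--     merged_rules = dict(DEFAULT_SPECIAL_RULES)
--     if sampling_rules:
--         merged_rules.update(sampling_rules)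
--
--     # One pass over the state's own labels with an integer accumulator: keep the
--     # smallest priority rank seen (no set, no scan of SPECIAL_PRIORITY per label
--     # beyond the rank lookup, no candidate list).
--     best_rank = len(SPECIAL_PRIORITY)
--     if state_name and state_name != "NONE":
--         for label in state_name.split("+"):
--             if label in merged_rules:
--                 try:
--                     r = SPECIAL_PRIORITY.index(label)
--                 except ValueError:
--                     continue
--                 if r < best_rank:
--                     best_rank = r
--
--     if best_rank < len(SPECIAL_PRIORITY):
--         rule = merged_rules[SPECIAL_PRIORITY[best_rank]]
--         return int(rule["window_points"]), int(rule["step_points"])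
--     return int(default_window_points), int(default_step_points)
-- ===== Notes on version B (the rewrite author's own statement) =====
-- stated objective: alternative
-- what changed: Replaces A's early-return scan over the SPECIAL_PRIORITY constant (testing membership in a set built from the state) with a single pass over the state's own split labels that keeps the smallest priority rank in an integer accumulator and indexes SPECIAL_PRIORITY once at the end; no set is built and the priority list is never scanned for the verdict.
import Mathlib
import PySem

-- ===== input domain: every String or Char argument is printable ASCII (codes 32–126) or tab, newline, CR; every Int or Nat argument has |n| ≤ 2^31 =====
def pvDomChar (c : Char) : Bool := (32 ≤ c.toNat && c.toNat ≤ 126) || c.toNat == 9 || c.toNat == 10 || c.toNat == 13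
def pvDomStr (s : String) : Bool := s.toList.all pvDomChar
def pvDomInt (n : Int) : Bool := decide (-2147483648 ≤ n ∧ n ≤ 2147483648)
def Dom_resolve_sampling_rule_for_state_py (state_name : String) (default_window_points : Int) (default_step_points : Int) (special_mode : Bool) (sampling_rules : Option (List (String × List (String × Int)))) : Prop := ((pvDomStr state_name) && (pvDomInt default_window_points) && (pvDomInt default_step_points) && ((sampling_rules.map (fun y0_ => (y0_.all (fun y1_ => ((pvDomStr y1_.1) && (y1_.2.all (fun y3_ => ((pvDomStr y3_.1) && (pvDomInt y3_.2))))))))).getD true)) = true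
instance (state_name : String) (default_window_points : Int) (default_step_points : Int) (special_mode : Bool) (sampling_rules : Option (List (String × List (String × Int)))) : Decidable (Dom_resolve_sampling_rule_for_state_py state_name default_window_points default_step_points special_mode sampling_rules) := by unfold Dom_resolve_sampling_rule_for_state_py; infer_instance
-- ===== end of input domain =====

-- B replaces A's early-return scan over the SPECIAL_PRIORITY constant (membership-testing a set
-- built from the state) by a single pass over the state's own split labels that keeps the smallest
-- priority rank in an integer accumulator, then indexes SPECIAL_PRIORITY once (alternative
-- decomposition: no set is built and the priority list is never scanned for a verdict).

-- ===== PORT A =====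
def DEFAULT_SPECIAL_RULES_py : PySem.Dict String (PySem.Dict String Int) :=
  PySem.Dict.ofList
    [("Driving(curve)", PySem.Dict.ofList [("window_points", 4000), ("step_points", 800)]),
     ("Stationary processes", PySem.Dict.ofList [("window_points", 4000), ("step_points", 800)]),
     ("Turntable wrapping", PySem.Dict.ofList [("window_points", 4000), ("step_points", 800)]),
     ("Lifting(raising)", PySem.Dict.ofList [("window_points", 2000), ("step_points", 200)]),
     ("Lifting(lowering)", PySem.Dict.ofList [("window_points", 2000), ("step_points", 200)])]

def SPECIAL_PRIORITY_py : List String :=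
  ["Lifting(raising)", "Lifting(lowering)", "Driving(curve)",
   "Stationary processes", "Turntable wrapping", "Driving(straight)"]

-- shared lines of both Pythons: 'merged_rules = dict(DEFAULT_SPECIAL_RULES); if sampling_rules: merged_rules.update(...)'
def pvMergedRules (sampling_rules : Option (List (String × List (String × Int)))) :
    PySem.Dict String (PySem.Dict String Int) :=
  match sampling_rules with
  | none => DEFAULT_SPECIAL_RULES_py
  | some rs =>
      if rs.isEmpty then DEFAULT_SPECIAL_RULES_py
      else DEFAULT_SPECIAL_RULES_py.update (rs.map (fun p => (p.1, PySem.Dict.ofList p.2)))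

-- A's line: 'active = set(state_name.split("+")) if state_name and state_name != "NONE" else set()'
def pvActive (state_name : String) : PySem.Set String :=
  if state_name ≠ "" ∧ state_name ≠ "NONE" then
    PySem.Set.ofList ((PySem.Str.split? state_name "+").getD [])
  else PySem.Set.empty

-- A's 'for label_name in SPECIAL_PRIORITY: … return' loop (rule["…"]: KeyError is excluded by Pre_, getD 0 there)
def pvPriorityScan (active : PySem.Set String)
    (merged : PySem.Dict String (PySem.Dict String Int)) (dw ds : Int) :
    List String → Int × Int
  | [] => (dw, ds)
  | label :: rest =>
      if PySem.Set.contains active label && merged.contains label then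
        let rule := (merged.get? label).getD PySem.Dict.empty
        (rule.getD "window_points" 0, rule.getD "step_points" 0)
      else pvPriorityScan active merged dw ds rest

def resolve_sampling_rule_for_state_py (state_name : String) (default_window_points : Int) (default_step_points : Int) (special_mode : Bool) (sampling_rules : Option (List (String × List (String × Int)))) : Int × Int :=
  if special_mode = false then (default_window_points, default_step_points)
  else
    pvPriorityScan (pvActive state_name) (pvMergedRules sampling_rules)
      default_window_points default_step_points SPECIAL_PRIORITY_py

-- ===== PORT B =====
-- B's 'for label in state_name.split("+"): … if r < best_rank: best_rank = r' loop
def pvBestRank (merged : PySem.Dict String (PySem.Dict String Int)) :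
    List String → Nat → Nat
  | [], best => best
  | label :: rest, best =>
      let best' :=
        if merged.contains label then
          match PySem.List.index? SPECIAL_PRIORITY_py label with
          | some r => if r < best then r else best
          | none => best          -- 'except ValueError: continue'
        else best
      pvBestRank merged rest best'

def resolve_sampling_rule_for_state_py_alt (state_name : String) (default_window_points : Int) (default_step_points : Int) (special_mode : Bool) (sampling_rules : Option (List (String × List (String × Int)))) : Int × Int :=
  if special_mode = false then (default_window_points, default_step_points)
  else
    let merged := pvMergedRules sampling_rules
    let labels :=
      if state_name ≠ "" ∧ state_name ≠ "NONE" then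
        (PySem.Str.split? state_name "+").getD []
      else []
    let best := pvBestRank merged labels SPECIAL_PRIORITY_py.length
    if best < SPECIAL_PRIORITY_py.length then
      let rule := (merged.get? (SPECIAL_PRIORITY_py.getD best "")).getD PySem.Dict.empty
      (rule.getD "window_points" 0, rule.getD "step_points" 0)
    else (default_window_points, default_step_points)

-- ===== PRECONDITION & SPEC =====
-- helper (Bool): the split labels of the state (A feeds them to set(), B loops over them)
def pvLabels (state_name : String) : List String :=
  if state_name ≠ "" ∧ state_name ≠ "NONE" then (PySem.Str.split? state_name "+").getD [] else []

-- helper (Bool): the label has an entry in merged_rules (a default or an override)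
def pvHasRule (sampling_rules : Option (List (String × List (String × Int)))) (l : String) : Bool :=
  l ∈ ["Driving(curve)", "Stationary processes", "Turntable wrapping",
       "Lifting(raising)", "Lifting(lowering)"] ||
  l ∈ (sampling_rules.getD []).map Prod.fst

-- helper (Bool): the merged rule for l (the last override of l, if any; defaults always qualify)
-- carries both "window_points" and "step_points"
def pvRuleHasKeys (sampling_rules : Option (List (String × List (String × Int)))) (l : String) : Bool :=
  match ((sampling_rules.getD []).filter (fun p => p.1 == l)).getLast? with
  | some p => ("window_points" ∈ p.2.map Prod.fst) && ("step_points" ∈ p.2.map Prod.fst)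
  | none => true

-- Pre_ excludes exactly the inputs on which the Python A raises KeyError: in special mode the
-- highest-priority active label that has a merged rule is selected, and its (overridden) rule
-- lacks "window_points" or "step_points"; B raises the same KeyError there.
def Pre_resolve_sampling_rule_for_state_py (state_name : String) (default_window_points : Int) (default_step_points : Int) (special_mode : Bool) (sampling_rules : Option (List (String × List (String × Int)))) : Prop :=
  special_mode = true →
    ∀ l ∈ SPECIAL_PRIORITY_py, l ∈ pvLabels state_name → pvHasRule sampling_rules l = true →
      (∀ l' ∈ SPECIAL_PRIORITY_py.take (SPECIAL_PRIORITY_py.idxOf l),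
          ¬(l' ∈ pvLabels state_name ∧ pvHasRule sampling_rules l' = true)) →
      pvRuleHasKeys sampling_rules l = true
instance (state_name : String) (default_window_points : Int) (default_step_points : Int) (special_mode : Bool) (sampling_rules : Option (List (String × List (String × Int)))) : Decidable (Pre_resolve_sampling_rule_for_state_py state_name default_window_points default_step_points special_mode sampling_rules) := by unfold Pre_resolve_sampling_rule_for_state_py; infer_instance

def pvWitness_resolve_sampling_rule_for_state_py : String × Int × Int × Bool × (Option (List (String × List (String × Int)))) :=
  ("Lifting(raising)+Driving(curve)", 100, 10, true,
   some [("Lifting(raising)", [("window_points", 500), ("step_points", 50)])])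

def Spec_resolve_sampling_rule_for_state_py (state_name : String) (default_window_points : Int) (default_step_points : Int) (special_mode : Bool) (sampling_rules : Option (List (String × List (String × Int)))) (out : Int × Int) : Prop := out = resolve_sampling_rule_for_state_py_alt state_name default_window_points default_step_points special_mode sampling_rules
instance (state_name : String) (default_window_points : Int) (default_step_points : Int) (special_mode : Bool) (sampling_rules : Option (List (String × List (String × Int)))) (out : Int × Int) : Decidable (Spec_resolve_sampling_rule_for_state_py state_name default_window_points default_step_points special_mode sampling_rules out) := by unfold Spec_resolve_sampling_rule_for_state_py; infer_instance

-- ===== CLAIM (what is proved, stated in full; the proofs are below) =====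
def Claim_equal_resolve_sampling_rule_for_state_py : Prop := ∀ (state_name : String) (default_window_points : Int) (default_step_points : Int) (special_mode : Bool) (sampling_rules : Option (List (String × List (String × Int)))), Dom_resolve_sampling_rule_for_state_py state_name default_window_points default_step_points special_mode sampling_rules → Pre_resolve_sampling_rule_for_state_py state_name default_window_points default_step_points special_mode sampling_rules → Spec_resolve_sampling_rule_for_state_py state_name default_window_points default_step_points special_mode sampling_rules (resolve_sampling_rule_for_state_py state_name default_window_points default_step_points special_mode sampling_rules)

-- ===== LEMMAS AND PROOFS =====

theorem pvBestRank_le (merged : PySem.Dict String (PySem.Dict String Int))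
    (ls : List String) (acc : Nat) : pvBestRank merged ls acc ≤ acc := by
  induction ls generalizing acc with
  | nil => exact le_rfl
  | cons x rest ih =>
      simp only [pvBestRank]
      split_ifs with h
      · cases hix : PySem.List.index? SPECIAL_PRIORITY_py x with
        | none => exact ih acc
        | some r =>
            show pvBestRank merged rest (if r < acc then r else acc) ≤ acc
            split_ifs with hr
            · exact le_trans (ih r) (le_of_lt hr)
            · exact ih acc
      · exact ih acc

theorem pvBestRank_ub (merged : PySem.Dict String (PySem.Dict String Int))
    (ls : List String) (acc : Nat) :
    ∀ l ∈ ls, merged.contains l = true →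
      ∀ r, PySem.List.index? SPECIAL_PRIORITY_py l = some r →
        pvBestRank merged ls acc ≤ r := by
  induction ls generalizing acc with
  | nil => intro l hl; simp at hl
  | cons x rest ih =>
      intro l hl hc r hr
      rcases List.mem_cons.mp hl with rfl | hl'
      · show pvBestRank merged rest
          (if merged.contains l then
            match PySem.List.index? SPECIAL_PRIORITY_py l with
            | some r => if r < acc then r else acc
            | none => acc
          else acc) ≤ r
        rw [if_pos hc, hr]
        show pvBestRank merged rest (if r < acc then r else acc) ≤ r
        split_ifs with h
        · exact pvBestRank_le merged rest r
        · exact le_trans (pvBestRank_le merged rest acc) (le_of_not_gt h)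
      · exact ih _ l hl' hc r hr

theorem pvBestRank_mem (merged : PySem.Dict String (PySem.Dict String Int))
    (ls : List String) (acc : Nat) :
    pvBestRank merged ls acc = acc ∨
      ∃ l ∈ ls, merged.contains l = true ∧
        PySem.List.index? SPECIAL_PRIORITY_py l = some (pvBestRank merged ls acc) := by
  induction ls generalizing acc with
  | nil => exact Or.inl rfl
  | cons x rest ih =>
      simp only [pvBestRank]
      have step : ∀ acc', (pvBestRank merged rest acc' = acc' ∨
          ∃ l ∈ rest, merged.contains l = true ∧
            PySem.List.index? SPECIAL_PRIORITY_py l = some (pvBestRank merged rest acc')) →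
          (acc' = acc ∨ (merged.contains x = true ∧
            PySem.List.index? SPECIAL_PRIORITY_py x = some acc')) →
          pvBestRank merged rest acc' = acc ∨
          ∃ l ∈ x :: rest, merged.contains l = true ∧
            PySem.List.index? SPECIAL_PRIORITY_py l = some (pvBestRank merged rest acc') := by
        intro acc' h1 h2
        rcases h1 with h1 | ⟨l, hl, hc, hr⟩
        · rcases h2 with rfl | ⟨hc, hr⟩
          · exact Or.inl h1
          · exact Or.inr ⟨x, List.mem_cons_self, hc, by rw [h1]; exact hr⟩
        · exact Or.inr ⟨l, List.mem_cons_of_mem _ hl, hc, hr⟩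
      split_ifs with h
      · cases hix : PySem.List.index? SPECIAL_PRIORITY_py x with
        | none => exact step acc (ih acc) (Or.inl rfl)
        | some r =>
            show pvBestRank merged rest (if r < acc then r else acc) = acc ∨
              ∃ l ∈ x :: rest, merged.contains l = true ∧
                PySem.List.index? SPECIAL_PRIORITY_py l =
                  some (pvBestRank merged rest (if r < acc then r else acc))
            split_ifs with hr
            · exact step r (ih r) (Or.inr ⟨h, hix⟩)
            · exact step acc (ih acc) (Or.inl rfl)
      · exact step acc (ih acc) (Or.inl rfl)

-- the rank the accumulator ends at is exactly the first qualifying priority index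
theorem pvBestRank_eq (merged : PySem.Dict String (PySem.Dict String Int))
    (ls : List String) (k : Nat) (lab : String)
    (hidx : PySem.List.index? SPECIAL_PRIORITY_py lab = some k)
    (hq : lab ∈ ls) (hc : merged.contains lab = true)
    (hprev : ∀ j, j < k → ¬(SPECIAL_PRIORITY_py.getD j "" ∈ ls ∧
      merged.contains (SPECIAL_PRIORITY_py.getD j "") = true)) :
    pvBestRank merged ls SPECIAL_PRIORITY_py.length = k := by
  have hub := pvBestRank_ub merged ls SPECIAL_PRIORITY_py.length lab hq hc k hidx
  rcases pvBestRank_mem merged ls SPECIAL_PRIORITY_py.length with he | ⟨l, hl, hc', hr⟩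
  · obtain ⟨hk, -, -⟩ := PySem.List.getElem_of_index?_eq_some hidx
    omega
  · obtain ⟨hbl, hget, -⟩ := PySem.List.getElem_of_index?_eq_some hr
    by_contra hne
    have hlt : pvBestRank merged ls SPECIAL_PRIORITY_py.length < k := lt_of_le_of_ne hub hne
    have hgd : SPECIAL_PRIORITY_py.getD (pvBestRank merged ls SPECIAL_PRIORITY_py.length) "" = l := by
      rw [List.getD_eq_getElem _ _ hbl, hget]
    exact hprev _ hlt ⟨hgd ▸ hl, hgd ▸ hc'⟩

-- A's priority scan equals B's best-rank pass, for any label list and merged dict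
theorem pv_scan_eq_best (merged : PySem.Dict String (PySem.Dict String Int))
    (ls : List String) (dw ds : Int) :
    pvPriorityScan (PySem.Set.ofList ls) merged dw ds SPECIAL_PRIORITY_py =
      (if pvBestRank merged ls SPECIAL_PRIORITY_py.length < SPECIAL_PRIORITY_py.length then
        let rule := (merged.get?
          (SPECIAL_PRIORITY_py.getD (pvBestRank merged ls SPECIAL_PRIORITY_py.length) "")).getD
          PySem.Dict.empty
        (rule.getD "window_points" 0, rule.getD "step_points" 0)
      else (dw, ds)) := by
  have hQ : ∀ x : String, (PySem.Set.contains (PySem.Set.ofList ls) x && merged.contains x) = true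
      ↔ (x ∈ ls ∧ merged.contains x = true) := by
    intro x
    rw [Bool.and_eq_true, PySem.Set.contains_iff, PySem.Set.mem_ofList]
  conv_lhs => rw [show SPECIAL_PRIORITY_py =
    ["Lifting(raising)", "Lifting(lowering)", "Driving(curve)",
     "Stationary processes", "Turntable wrapping", "Driving(straight)"] from rfl]
  simp only [pvPriorityScan]
  by_cases h0 : (("Lifting(raising)" : String) ∈ ls ∧ merged.contains "Lifting(raising)" = true)
  · rw [if_pos ((hQ _).mpr h0),
      pvBestRank_eq merged ls 0 "Lifting(raising)" (by decide) h0.1 h0.2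
        (fun j hj => absurd hj (Nat.not_lt_zero j))]
    rfl
  rw [if_neg (fun hb => h0 ((hQ _).mp hb))]
  by_cases h1 : (("Lifting(lowering)" : String) ∈ ls ∧ merged.contains "Lifting(lowering)" = true)
  · rw [if_pos ((hQ _).mpr h1),
      pvBestRank_eq merged ls 1 "Lifting(lowering)" (by decide) h1.1 h1.2
        (by intro j hj; interval_cases j; exact h0)]
    rfl
  rw [if_neg (fun hb => h1 ((hQ _).mp hb))]
  by_cases h2 : (("Driving(curve)" : String) ∈ ls ∧ merged.contains "Driving(curve)" = true)
  · rw [if_pos ((hQ _).mpr h2),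
      pvBestRank_eq merged ls 2 "Driving(curve)" (by decide) h2.1 h2.2
        (by intro j hj; interval_cases j; exacts [h0, h1])]
    rfl
  rw [if_neg (fun hb => h2 ((hQ _).mp hb))]
  by_cases h3 : (("Stationary processes" : String) ∈ ls ∧ merged.contains "Stationary processes" = true)
  · rw [if_pos ((hQ _).mpr h3),
      pvBestRank_eq merged ls 3 "Stationary processes" (by decide) h3.1 h3.2
        (by intro j hj; interval_cases j; exacts [h0, h1, h2])]
    rfl
  rw [if_neg (fun hb => h3 ((hQ _).mp hb))]
  by_cases h4 : (("Turntable wrapping" : String) ∈ ls ∧ merged.contains "Turntable wrapping" = true)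
  · rw [if_pos ((hQ _).mpr h4),
      pvBestRank_eq merged ls 4 "Turntable wrapping" (by decide) h4.1 h4.2
        (by intro j hj; interval_cases j; exacts [h0, h1, h2, h3])]
    rfl
  rw [if_neg (fun hb => h4 ((hQ _).mp hb))]
  by_cases h5 : (("Driving(straight)" : String) ∈ ls ∧ merged.contains "Driving(straight)" = true)
  · rw [if_pos ((hQ _).mpr h5),
      pvBestRank_eq merged ls 5 "Driving(straight)" (by decide) h5.1 h5.2
        (by intro j hj; interval_cases j; exacts [h0, h1, h2, h3, h4])]
    rfl
  rw [if_neg (fun hb => h5 ((hQ _).mp hb))]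
  have hbest : pvBestRank merged ls SPECIAL_PRIORITY_py.length = SPECIAL_PRIORITY_py.length := by
    rcases pvBestRank_mem merged ls SPECIAL_PRIORITY_py.length with he | ⟨l, hl, hc, hr⟩
    · exact he
    · have hmem : l ∈ SPECIAL_PRIORITY_py := by
        rw [← PySem.List.index?_isSome_iff, hr]; rfl
      simp only [SPECIAL_PRIORITY_py, List.mem_cons, List.not_mem_nil, or_false] at hmem
      rcases hmem with rfl|rfl|rfl|rfl|rfl|rfl
      exacts [absurd ⟨hl, hc⟩ h0, absurd ⟨hl, hc⟩ h1, absurd ⟨hl, hc⟩ h2,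
              absurd ⟨hl, hc⟩ h3, absurd ⟨hl, hc⟩ h4, absurd ⟨hl, hc⟩ h5]
  rw [hbest]
  simp

theorem pvActive_eq (state_name : String) :
    pvActive state_name = PySem.Set.ofList (pvLabels state_name) := by
  unfold pvActive pvLabels
  split_ifs <;> rfl

-- ===== VERDICT (by name: the statement is the Claim_ definition above) =====
theorem resolve_sampling_rule_for_state_py_spec : Claim_equal_resolve_sampling_rule_for_state_py := by
  intro state_name dw ds special_mode sampling_rules _ _
  unfold Spec_resolve_sampling_rule_for_state_py
  unfold resolve_sampling_rule_for_state_py resolve_sampling_rule_for_state_py_alt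
  cases special_mode with
  | false => rfl
  | true =>
      simp only [Bool.true_eq_false, if_false]
      rw [pvActive_eq,
          pv_scan_eq_best (pvMergedRules sampling_rules) (pvLabels state_name) dw ds]
      unfold pvLabels
      rfl
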